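-- pv_equiv track=rewrite | github.com/garrrychan/code_snippets | guestlogix.py | dict_counts
-- ===== SOURCE A (Python) =====
-- def dict_counts(mixed_str):
--     my_dict = {}
--     for char in mixed_str:
--         # upper and ignore spaces
--         if char == char.upper() and char != ' ':
--             if char in my_dict:
--                 my_dict[char] += 1
--             else:
--                 my_dict[char] = 1
--     return my_dict
-- ===== SOURCE B (Python) =====
-- def dict_counts(mixed_str):
--     kept = [char for char in mixed_str if char == char.upper() and char != ' ']
--
--     def count_groups(chars):
--         if not chars:
--             return {}
--         head = chars[0]
--         rest = [c for c in chars if c != head]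
--         result = {head: len(chars) - len(rest)}
--         result.update(count_groups(rest))
--         return result
--
--     return count_groups(kept)
-- ===== Notes on version B (the rewrite author's own statement) =====
-- stated objective: alternative
-- what changed: B filters the kept characters once, then counts them by recursive partitioning: take the first character, remove all its occurrences, record count = length difference, and recurse on the remainder, merging via dict.update — instead of A's single-pass increment-or-initialise dict accumulation.
import Mathlib
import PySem

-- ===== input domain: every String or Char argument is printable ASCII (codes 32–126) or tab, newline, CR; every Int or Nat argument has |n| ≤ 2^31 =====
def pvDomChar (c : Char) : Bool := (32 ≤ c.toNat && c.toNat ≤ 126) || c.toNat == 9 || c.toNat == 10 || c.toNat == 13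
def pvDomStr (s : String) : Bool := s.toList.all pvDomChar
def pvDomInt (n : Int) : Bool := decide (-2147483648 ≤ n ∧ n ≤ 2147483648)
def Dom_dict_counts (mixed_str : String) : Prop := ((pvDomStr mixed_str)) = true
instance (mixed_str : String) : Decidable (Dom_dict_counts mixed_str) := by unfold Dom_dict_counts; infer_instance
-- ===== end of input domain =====

-- B replaces A's single-pass increment-or-initialise dict loop with a filter pass followed by
-- recursive partitioning (count the first character by removing all its occurrences, recurse on
-- the remainder) — objective: alternative, not claimed faster.

-- ===== PORT A =====
-- literal port of A: iterate the characters (1-char strings), accumulate counts in a dict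
def dict_counts (mixed_str : String) : List (String × Int) :=
  ((mixed_str.toList.map (fun c => String.mk [c])).foldl
    (fun my_dict char =>
      if char == PySem.Str.upper char && char != " " then
        if my_dict.contains char then my_dict.insert char (my_dict.getD char 0 + 1)
        else my_dict.insert char 1
      else my_dict)
    PySem.Dict.empty).items

-- ===== PORT B =====
-- literal port of Source B's count_groups: head, rest = chars minus head's occurrences,
-- {head: len(chars) - len(rest)} updated with the recursive result
def countGroups : List String → PySem.Dict String Int
  | [] => PySem.Dict.empty
  | head :: tail =>
    let rest := (head :: tail).filter (fun c => c != head)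
    let result := PySem.Dict.empty.insert head (((head :: tail).length : Int) - rest.length)
    result.update (countGroups rest).items
termination_by chars => chars.length
decreasing_by
  simp only [List.filter_cons, bne_self_eq_false, List.length_cons]
  exact Nat.lt_succ_of_le (List.length_filter_le _ _)

def dict_counts_alt (mixed_str : String) : List (String × Int) :=
  let kept := (mixed_str.toList.map (fun c => String.mk [c])).filter
      (fun char => char == PySem.Str.upper char && char != " ")
  (countGroups kept).items

-- ===== PRECONDITION & SPEC =====
def Spec_dict_counts (mixed_str : String) (out : List (String × Int)) : Prop := out = dict_counts_alt mixed_str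
instance (mixed_str : String) (out : List (String × Int)) : Decidable (Spec_dict_counts mixed_str out) := by unfold Spec_dict_counts; infer_instance

-- ===== CLAIM (what is proved, stated in full; the proofs are below) =====
def Claim_equal_dict_counts : Prop := ∀ (mixed_str : String), Dom_dict_counts mixed_str → Spec_dict_counts mixed_str (dict_counts mixed_str)

-- ===== LEMMAS AND PROOFS =====

theorem find?_beq_self (l : List String) (x : String) (hx : x ∈ l) :
    List.find? (fun s => s == x) l = some x := by
  cases h : List.find? (fun s => s == x) l with
  | none => simpa using List.find?_eq_none.mp h x hx
  | some y => have hb := List.find?_some h; simp at hb; rw [hb]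

theorem dedup_concat (xs : List String) (x : String) :
    PySem.List.dedup (xs ++ [x])
      = if x ∈ xs then PySem.List.dedup xs else PySem.List.dedup xs ++ [x] := by
  have h1 : PySem.List.dedup (xs ++ [x]) = PySem.Set.add (PySem.List.dedup xs) x := by
    simp [PySem.List.dedup, PySem.Set.ofList, List.foldl_append]
  have hc : PySem.Set.contains (PySem.List.dedup xs) x = decide (x ∈ xs) := by
    simp [PySem.Set.contains]
  rw [h1, PySem.Set.add, hc]
  split_ifs with h <;> simp_all

theorem contains_mk_map (xs : List String) (c : String → Int) (x : String) :
    (PySem.Dict.mk ((PySem.List.dedup xs).map (fun s => (s, c s)))).contains x = decide (x ∈ xs) := by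
  simp only [PySem.Dict.contains_mk, List.any_map, Function.comp_def]
  by_cases hx : x ∈ xs
  · simp [hx, List.any_eq_true]
  · simp only [hx, decide_false, List.any_eq_false]
    intro y hy
    have : y ∈ xs := (PySem.List.mem_dedup xs y).1 hy
    simp; exact fun h => hx (h ▸ this)

theorem getD_mk_map (xs : List String) (c : String → Int) (x : String) (hx : x ∈ xs) :
    (PySem.Dict.mk ((PySem.List.dedup xs).map (fun s => (s, c s)))).getD x 0 = c x := by
  rw [PySem.Dict.getD, PySem.Dict.get?]
  simp only [List.find?_map]
  rw [show ((fun p : String × Int => p.1 == x) ∘ fun s => (s, c s)) = fun s => s == x from rfl]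
  rw [find?_beq_self _ x ((PySem.List.mem_dedup xs x).2 hx)]
  rfl

-- A's accumulation loop over any list of keys yields the dict whose items pair the
-- first-occurrence-deduplicated keys with their total counts.
theorem foldA_gen (xs : List String) :
    xs.foldl
      (fun (d : PySem.Dict String Int) s =>
        if d.contains s then d.insert s (d.getD s 0 + 1) else d.insert s 1)
      PySem.Dict.empty
    = PySem.Dict.mk ((PySem.List.dedup xs).map (fun s => (s, (xs.count s : Int)))) := by
  induction xs using List.reverseRecOn with
  | nil => rfl
  | append_singleton xs x ih =>
    rw [List.foldl_append, List.foldl_cons, List.foldl_nil, ih, dedup_concat]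
    rw [contains_mk_map]
    by_cases hx : x ∈ xs
    · simp only [hx, decide_true, if_true]
      rw [getD_mk_map _ _ _ hx]
      unfold PySem.Dict.insert
      rw [contains_mk_map]
      simp only [hx, decide_true, if_true]
      congr 1
      rw [List.map_map]
      apply List.map_congr_left
      intro s hs
      by_cases hsx : s = x
      · subst hsx; simp [List.count_append]
      · simp [Function.comp, List.count_append, List.count_eq_zero, hsx]
    · simp only [hx, decide_false, Bool.false_eq_true, if_false]
      unfold PySem.Dict.insert
      rw [contains_mk_map]
      simp only [hx, decide_false, Bool.false_eq_true, if_false]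
      congr 1
      rw [List.map_append]
      congr 1
      · apply List.map_congr_left
        intro s hs
        have hsx : s ≠ x := fun h => hx (h ▸ (PySem.List.mem_dedup xs s).1 hs)
        simp [List.count_append, List.count_eq_zero, hsx]
      · simp [List.count_append, List.count_eq_zero_of_not_mem hx]

-- dedup commutes with filter
theorem dedup_filter (p : String → Bool) (t : List String) :
    PySem.List.dedup (t.filter p) = (PySem.List.dedup t).filter p := by
  induction t using List.reverseRecOn with
  | nil => rfl
  | append_singleton xs x ih =>
    by_cases hp : p x = true
    · rw [List.filter_append, show List.filter p [x] = [x] by simp [hp],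
        dedup_concat, dedup_concat, ih]
      by_cases hx : x ∈ xs
      · rw [if_pos (List.mem_filter.2 ⟨hx, hp⟩), if_pos hx]
      · rw [if_neg (fun h => hx (List.mem_filter.1 h).1), if_neg hx, List.filter_append,
          show List.filter p [x] = [x] by simp [hp]]
    · rw [List.filter_append, show List.filter p [x] = [] by simp [hp], List.append_nil,
        ih, dedup_concat]
      by_cases hx : x ∈ xs
      · rw [if_pos hx]
      · rw [if_neg hx, List.filter_append, show List.filter p [x] = [] by simp [hp],
          List.append_nil]

-- dedup of a cons: the head, then the deduplicated tail with the head filtered out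
theorem dedup_cons (x : String) (t : List String) :
    PySem.List.dedup (x :: t) = x :: (PySem.List.dedup t).filter (fun y => y != x) := by
  induction t using List.reverseRecOn with
  | nil => rfl
  | append_singleton xs y ih =>
    rw [show x :: (xs ++ [y]) = (x :: xs) ++ [y] from rfl, dedup_concat, dedup_concat, ih]
    by_cases hy : y ∈ xs
    · rw [if_pos (List.mem_cons_of_mem x hy), if_pos hy]
    · by_cases hyx : y = x
      · subst hyx
        rw [if_pos List.mem_cons_self, if_neg hy, List.filter_append,
          show List.filter (fun z => z != y) [y] = [] by simp, List.append_nil]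
      · rw [if_neg (by simp [hyx, hy]), if_neg hy, List.filter_append,
          show List.filter (fun z => z != x) [y] = [y] by simp [hyx], List.cons_append]

theorem length_filter_ne_add_count (l : List String) (x : String) :
    (l.filter (fun a => a != x)).length + l.count x = l.length := by
  induction l with
  | nil => simp
  | cons h t ih =>
    rw [List.filter_cons, List.count_cons, List.length_cons]
    by_cases hx : h = x
    · rw [show (h != x) = false from by simp [hx], if_neg (by simp),
        if_pos (by simp [hx])]
      omega
    · rw [show (h != x) = true from by simp [hx], if_pos (by simp), List.length_cons,
        if_neg (by simp [hx])]
      omega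

-- the dict {x: v} as a literal
theorem insert_empty_mk (x : String) (v : Int) :
    PySem.Dict.empty.insert x v = PySem.Dict.mk [(x, v)] := by
  apply PySem.Dict.ext
  rw [PySem.Dict.items_insert_of_not_contains _ _ (by rfl)]
  rfl

-- B's recursive partition produces the dict of first-occurrence keys with total counts.
theorem countGroups_eq (xs : List String) :
    countGroups xs
      = PySem.Dict.mk ((PySem.List.dedup xs).map (fun s => (s, (xs.count s : Int)))) := by
  induction hn : xs.length using Nat.strong_induction_on generalizing xs with
  | _ n ih =>
    match xs with
    | [] => rw [countGroups]; rfl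
    | x :: t =>
      subst hn
      rw [countGroups]
      have hlen : ((x :: t).filter (fun c => c != x)).length < (x :: t).length := by
        rw [List.filter_cons, show (x != x) = false from by simp, if_neg (by simp),
          List.length_cons]
        exact Nat.lt_succ_of_le (List.length_filter_le _ _)
      rw [ih _ hlen _ rfl, insert_empty_mk]
      apply PySem.Dict.ext
      have hfresh : ∀ p ∈ (PySem.List.dedup ((x :: t).filter (fun c => c != x))).map
          (fun s => (s, (((x :: t).filter (fun c => c != x)).count s : Int))),
          (PySem.Dict.mk [(x, ((x :: t).length : Int)
              - ((x :: t).filter (fun c => c != x)).length)]).contains p.1 = false := by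
        intro p hp
        obtain ⟨s, hs, rfl⟩ := List.mem_map.1 hp
        have hs' : s ∈ (x :: t).filter (fun c => c != x) := (PySem.List.mem_dedup _ _).1 hs
        have hsx : (s == x) = false := by
          have := (List.mem_filter.1 hs').2
          simpa using this
        have hxs : x ≠ s := fun h => by subst h; simp at hsx
        simp [PySem.Dict.contains_mk, hxs]
      have hnodup : (((PySem.List.dedup ((x :: t).filter (fun c => c != x))).map
          (fun s => (s, (((x :: t).filter (fun c => c != x)).count s : Int)))).map
            Prod.fst).Nodup := by
        rw [List.map_map, show ((Prod.fst : String × Int → String) ∘ fun s =>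
          (s, (((x :: t).filter (fun c => c != x)).count s : Int))) = id from rfl, List.map_id]
        exact PySem.List.nodup_dedup _
      rw [show (PySem.Dict.update (PySem.Dict.mk [(x, ((x :: t).length : Int)
            - ((x :: t).filter (fun c => c != x)).length)])
            ((PySem.List.dedup ((x :: t).filter (fun c => c != x))).map
              (fun s => (s, (((x :: t).filter (fun c => c != x)).count s : Int)))))
          = List.foldl (fun d a => d.insert (Prod.fst a) (Prod.snd a))
              (PySem.Dict.mk [(x, ((x :: t).length : Int)
                - ((x :: t).filter (fun c => c != x)).length)])
              ((PySem.List.dedup ((x :: t).filter (fun c => c != x))).map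
                (fun s => (s, (((x :: t).filter (fun c => c != x)).count s : Int))))
          from rfl,
        PySem.Dict.items_foldl_insert_fresh _ _ _ _ hfresh hnodup]
      -- both sides are now plain lists
      rw [show (PySem.Dict.mk [(x, ((x :: t).length : Int)
            - ((x :: t).filter (fun c => c != x)).length)]).items
          = [(x, ((x :: t).length : Int) - ((x :: t).filter (fun c => c != x)).length)]
          from rfl,
        show (PySem.Dict.mk ((PySem.List.dedup (x :: t)).map
            (fun s => (s, ((x :: t).count s : Int))))).items
          = (PySem.List.dedup (x :: t)).map (fun s => (s, ((x :: t).count s : Int)))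
          from rfl,
        dedup_cons, List.map_cons]
      have hcount : ((x :: t).length : Int)
          - ((x :: t).filter (fun c => c != x)).length = ((x :: t).count x : Int) := by
        have := length_filter_ne_add_count (x :: t) x
        push_cast [← this]
        ring
      rw [hcount]
      have hrx : (x :: t).filter (fun c => c != x) = t.filter (fun c => c != x) := by
        rw [List.filter_cons, show (x != x) = false from by simp, if_neg (by simp)]
      rw [List.singleton_append, hrx, dedup_filter, List.map_map]
      congr 1
      apply List.map_congr_left
      intro s hs
      have hsx : (s != x) = true := (List.mem_filter.1 hs).2
      show (s, ((t.filter (fun c => c != x)).count s : Int)) = (s, ((x :: t).count s : Int))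
      rw [List.count_filter (p := fun c => c != x) (a := s) (l := t) hsx, List.count_cons]
      have hxs : (x == s) = false := by
        simp only [bne_iff_ne, ne_eq] at hsx
        simpa using fun h => hsx h.symm
      simp [hxs]

-- ===== VERDICT (by name: the statement is the Claim_ definition above) =====
theorem dict_counts_spec : Claim_equal_dict_counts := by
  intro mixed_str _
  unfold Spec_dict_counts dict_counts dict_counts_alt
  simp only [← List.foldl_filter, foldA_gen, countGroups_eq]
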